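-- pv_equiv track=rewrite | github.com/chillbot-io/openlabels | scrubiq/detectors/financial.py | _validate_isin
-- ===== SOURCE A (Python) =====
-- def _validate_isin(isin: str) -> bool:
--     """
--     Validate ISIN check digit using Luhn algorithm.
--
--     ISIN: 12 characters
--     - Positions 1-2: Country code (letters)
--     - Positions 3-11: National security identifier (alphanumeric)
--     - Position 12: Check digit
--     """
--     isin = isin.upper().replace(' ', '').replace('-', '')
--
--     if len(isin) != 12:
--         return False
--
--     # First two must be letters (country code)
--     if not isin[:2].isalpha():
--         return False
--
--     # Convert to numeric string: A=10, B=11, ..., Z=35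
--     numeric = ''
--     for c in isin:
--         if c.isdigit():
--             numeric += c
--         elif c.isalpha():
--             numeric += str(ord(c) - ord('A') + 10)
--         else:
--             return False
--
--     # Apply Luhn algorithm
--     total = 0
--     for i, digit in enumerate(reversed(numeric)):
--         d = int(digit)
--         if i % 2 == 1:
--             d *= 2
--             if d > 9:
--                 d -= 9
--         total += d
--
--     return total % 10 == 0
-- ===== SOURCE B (Python) =====
-- def _validate_isin(isin: str) -> bool:
--     """One right-to-left pass: no intermediate numeric string; a doubling
--     toggle is threaded through, letters emit their two digits units-first."""
--     isin = isin.upper().replace(' ', '').replace('-', '')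
--     if len(isin) != 12 or not isin[:2].isalpha():
--         return False
--     total = 0
--     dbl = False
--     for c in reversed(isin):
--         if c.isdigit():
--             digits = (ord(c) - 48,)
--         elif c.isalpha():
--             v = ord(c) - 55
--             digits = (v % 10, v // 10)
--         else:
--             return False
--         for d in digits:
--             if dbl:
--                 d *= 2
--                 if d > 9:
--                     d -= 9
--             total += d
--             dbl = not dbl
--     return total % 10 == 0
-- ===== Notes on version B (the rewrite author's own statement) =====
-- stated objective: alternative
-- what changed: B fuses A's two passes (building the intermediate numeric string, then Luhn over its reversal with an index parity test) into a single right-to-left pass over the cleaned ISIN that threads a doubling toggle and emits each letter's two digits units-first, never materialising the numeric string.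
import Mathlib
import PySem

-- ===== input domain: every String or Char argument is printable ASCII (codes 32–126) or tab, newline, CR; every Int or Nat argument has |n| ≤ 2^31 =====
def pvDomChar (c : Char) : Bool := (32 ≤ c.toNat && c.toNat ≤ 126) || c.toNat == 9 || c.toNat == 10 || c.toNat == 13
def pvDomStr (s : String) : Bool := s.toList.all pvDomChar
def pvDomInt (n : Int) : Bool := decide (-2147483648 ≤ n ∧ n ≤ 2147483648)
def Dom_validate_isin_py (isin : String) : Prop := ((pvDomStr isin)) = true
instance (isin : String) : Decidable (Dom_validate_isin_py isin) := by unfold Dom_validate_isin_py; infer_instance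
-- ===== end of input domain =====

-- B fuses A's numeric-string construction and Luhn fold into one right-to-left pass with a
-- doubling toggle (letters emit their two digits units-first); alternative decomposition, same cost.


-- ===== PORT A =====
-- A's 'numeric' building loop; none = the 'return False' on a non-alphanumeric character
def aNumeric : List Char → List Char → Option (List Char)
  | [], numeric => some numeric
  | c :: rest, numeric =>
    if PySem.Chars.isdigit c then
      aNumeric rest (numeric ++ [c])
    else if PySem.Chars.isalpha c then
      aNumeric rest (numeric ++ PySem.Int.toChars ((c.toNat : Int) - 65 + 10))
    else
      none

-- A's Luhn loop body: 'for i, digit in enumerate(reversed(numeric))' carrying (i, total);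
-- int(digit) ported as ord(digit) - 48, exact on the digit characters 'numeric' consists of
def aLuhnStep (st : Nat × Int) (c : Char) : Nat × Int :=
  let d : Int := (c.toNat : Int) - 48
  let d := if st.1 % 2 == 1 then (let d2 := d * 2; if d2 > 9 then d2 - 9 else d2) else d
  (st.1 + 1, st.2 + d)

def validate_isin_py (isin : String) : Bool :=
  let s := PySem.Chars.replace (PySem.Chars.replace (PySem.Chars.upper isin.toList) [' '] []) ['-'] []
  if s.length ≠ 12 then false
  else if PySem.Chars.strIsalpha (PySem.List.slice s none (some 2)) = false then false
  else
    match aNumeric s [] with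
    | none => false
    | some numeric =>
      let total := (numeric.reverse.foldl aLuhnStep (0, 0)).2
      PySem.Int.mod total 10 == 0

-- ===== PORT B =====
-- B's inner 'for d in digits' body: apply the toggle, add, flip
def bStep (st : Int × Bool) (d : Int) : Int × Bool :=
  let d := if st.2 then (let d2 := d * 2; if d2 > 9 then d2 - 9 else d2) else d
  (st.1 + d, !st.2)

-- B's single right-to-left pass (called on the reversed cleaned string)
def bLoop : List Char → Int × Bool → Option Int
  | [], st => some st.1
  | c :: rest, st =>
    if PySem.Chars.isdigit c then
      bLoop rest ([(c.toNat : Int) - 48].foldl bStep st)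
    else if PySem.Chars.isalpha c then
      let v : Int := (c.toNat : Int) - 55
      bLoop rest ([PySem.Int.mod v 10, PySem.Int.floordiv v 10].foldl bStep st)
    else none

def validate_isin_py_alt (isin : String) : Bool :=
  let s := PySem.Chars.replace (PySem.Chars.replace (PySem.Chars.upper isin.toList) [' '] []) ['-'] []
  if s.length ≠ 12 ∨ PySem.Chars.strIsalpha (PySem.List.slice s none (some 2)) = false then false
  else
    match bLoop s.reverse (0, false) with
    | none => false
    | some total => PySem.Int.mod total 10 == 0

-- ===== PRECONDITION & SPEC =====
def Spec_validate_isin_py (isin : String) (out : Bool) : Prop := out = validate_isin_py_alt isin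
instance (isin : String) (out : Bool) : Decidable (Spec_validate_isin_py isin out) := by unfold Spec_validate_isin_py; infer_instance

-- ===== CLAIM (what is proved, stated in full; the proofs are below) =====
def Claim_equal_validate_isin_py : Prop := ∀ (isin : String), Dom_validate_isin_py isin → Spec_validate_isin_py isin (validate_isin_py isin)

-- ===== LEMMAS AND PROOFS =====

-- digit value of a digit character
def dv (c : Char) : Int := (c.toNat : Int) - 48

-- Luhn weight of one digit under toggle b
def lw (d : Int) (b : Bool) : Int :=
  if b then (let d2 := d * 2; if d2 > 9 then d2 - 9 else d2) else d

-- Luhn weighted sum of a digit list, toggle starting at b and flipping each step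
def W : List Int → Bool → Int
  | [], _ => 0
  | d :: ds, b => lw d b + W ds (!b)

-- the digit-character expansion A's first loop concatenates (suffix-building form)
def expandA : List Char → Option (List Char)
  | [] => some []
  | c :: cs =>
    if PySem.Chars.isdigit c then (expandA cs).map (fun r => c :: r)
    else if PySem.Chars.isalpha c then
      (expandA cs).map (fun r => PySem.Int.toChars ((c.toNat : Int) - 65 + 10) ++ r)
    else none

-- the digit-value stream B consumes (per input character, already in B's emission order)
def expandB : List Char → Option (List Int)
  | [] => some []
  | c :: cs =>
    if PySem.Chars.isdigit c then (expandB cs).map (fun r => dv c :: r)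
    else if PySem.Chars.isalpha c then
      (expandB cs).map (fun r => PySem.Int.mod ((c.toNat : Int) - 55) 10 ::
        PySem.Int.floordiv ((c.toNat : Int) - 55) 10 :: r)
    else none

lemma aNumeric_eq (cs : List Char) (acc : List Char) :
    aNumeric cs acc = (expandA cs).map (acc ++ ·) := by
  induction cs generalizing acc with
  | nil => simp [aNumeric, expandA]
  | cons c cs ih =>
    simp only [aNumeric, expandA]
    split_ifs with h1 h2 <;> simp [ih, Option.map_map, Function.comp_def]

lemma parity_flip (i : Nat) : ((i + 1) % 2 == 1) = !(i % 2 == 1) := by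
  rcases Nat.mod_two_eq_zero_or_one i with h | h <;> simp [Nat.add_mod, h]

lemma aFold (ds : List Char) (i : Nat) (t : Int) :
    (ds.foldl aLuhnStep (i, t)).2 = t + W (ds.map dv) (i % 2 == 1) := by
  induction ds generalizing i t with
  | nil => simp [W]
  | cons c ds ih =>
    have : aLuhnStep (i, t) c = (i + 1, t + lw (dv c) (i % 2 == 1)) := by
      simp [aLuhnStep, lw, dv]
    simp only [List.foldl_cons, this, List.map_cons, W]
    rw [ih, parity_flip, add_assoc]

lemma bLoop_eq (l : List Char) (t : Int) (dbl : Bool) :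
    bLoop l (t, dbl) = (expandB l).map (fun ds => t + W ds dbl) := by
  induction l generalizing t dbl with
  | nil => simp [bLoop, expandB, W]
  | cons c l ih =>
    simp only [bLoop, expandB]
    split_ifs with h1 h2
    · cases hE : expandB l <;>
        simp [bStep, ih, hE, W, lw, dv, add_assoc]
    · cases hE : expandB l <;>
        simp [bStep, ih, hE, W, lw, add_assoc]
    · rfl

lemma expandB_append (l1 l2 : List Char) :
    expandB (l1 ++ l2) = (expandB l1).bind (fun a => (expandB l2).map (a ++ ·)) := by
  induction l1 with
  | nil => simp [expandB]
  | cons c l1 ih =>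
    simp only [List.cons_append, expandB, ih]
    split_ifs with h1 h2 <;>
      cases hE : expandB l1 <;> cases hE2 : expandB l2 <;> simp

lemma alpha_bounds (c : Char) (h : PySem.Chars.isalpha c = true) :
    65 ≤ c.toNat ∧ c.toNat ≤ 122 := by
  simp only [PySem.Chars.isalpha, PySem.Chars.isupper, PySem.Chars.islower, Bool.or_eq_true,
    Bool.and_eq_true, decide_eq_true_eq, Char.le_def, UInt32.le_iff_toNat_le, Char.toNat_val,
    Char.reduceVal, UInt32.reduceToNat] at h
  simp only [Char.toNat] at *
  rcases h with ⟨h1, h2⟩ | ⟨h1, h2⟩ <;> omega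

lemma toChars_digits : ∀ m : Nat, m < 68 → 10 ≤ m →
    (PySem.Int.toChars (m : Int)).map dv = [((m / 10 : Nat) : Int), ((m % 10 : Nat) : Int)] := by
  decide

lemma bridge (cs : List Char) :
    expandB cs.reverse = (expandA cs).map (fun num => (num.map dv).reverse) := by
  induction cs with
  | nil => simp [expandA, expandB]
  | cons c cs ih =>
    rw [List.reverse_cons, expandB_append, ih]
    simp only [expandA]
    split_ifs with h1 h2
    · cases hE : expandA cs <;> simp [expandB, h1]
    · rcases alpha_bounds c h2 with ⟨hlo, hhi⟩
      have hm : ((c.toNat : Int) - 65 + 10) = ((c.toNat - 55 : Nat) : Int) := by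
        push_cast [Nat.cast_sub (by omega : 55 ≤ c.toNat)]; ring
      have hv : ((c.toNat : Int) - 55) = ((c.toNat - 55 : Nat) : Int) := by
        push_cast [Nat.cast_sub (by omega : 55 ≤ c.toNat)]; ring
      have hd := toChars_digits (c.toNat - 55) (by omega) (by omega)
      have hmod : PySem.Int.mod ((c.toNat : Int) - 55) 10 = ((c.toNat - 55) % 10 : Nat) := by
        rw [hv]; exact_mod_cast PySem.Int.mod_natCast (c.toNat - 55) 10
      have hdiv : PySem.Int.floordiv ((c.toNat : Int) - 55) 10 = ((c.toNat - 55) / 10 : Nat) := by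
        rw [hv]; exact_mod_cast PySem.Int.floordiv_natCast (c.toNat - 55) 10
      have hdig : PySem.Chars.isdigit c = false := by
        simp only [PySem.Chars.isdigit, Bool.and_eq_false_iff, decide_eq_false_iff_not,
          Char.le_def, UInt32.le_iff_toNat_le, Char.toNat_val, Char.reduceVal,
          UInt32.reduceToNat, not_le]
        right; simp only [Char.toNat] at *; omega
      cases hE : expandA cs <;>
        simp [expandB, hdig, h2, hm, hv, hd]
    · cases hE : expandA cs <;> simp [expandB, h1, h2]

-- ===== VERDICT (by name: the statement is the Claim_ definition above) =====
theorem validate_isin_py_spec : Claim_equal_validate_isin_py := by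
  intro isin _
  unfold Spec_validate_isin_py validate_isin_py validate_isin_py_alt
  generalize PySem.Chars.replace (PySem.Chars.replace (PySem.Chars.upper isin.toList) [' '] []) ['-'] [] = s
  by_cases h1 : s.length = 12
  · by_cases h2 : PySem.Chars.strIsalpha (PySem.List.slice s none (some 2)) = false
    · simp [h1, h2]
    · simp only [h1, h2, ne_eq, not_true_eq_false, if_false, false_or]
      rw [aNumeric_eq, bLoop_eq, bridge]
      cases hE : expandA s with
      | none => simp
      | some num =>
        simp only [Option.map_some, List.nil_append]
        rw [show (num.reverse.foldl aLuhnStep (0, 0)).2 = W (num.map dv).reverse false from by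
          rw [aFold]; simp]
        simp
  · simp [h1]
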